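-- pv_equiv track=rewrite | github.com/EzeeRL/Parcial | Parte 1/Punto 1.py | es_numero_real
-- ===== SOURCE A (Python) =====
-- def es_numero_real(cadena):
--     tiene_punto = False
--     if len(cadena) == 0:
--         return False
--
--     for i in range(len(cadena)):
--         c = cadena[i]
--         if c == "-":
--             if i != 0:
--                 return False
--         elif c == ".":
--             if tiene_punto:
--                 return False
--             tiene_punto = True
--         elif ord(c) < 48 or ord(c) > 57:
--             return False
--     return True
-- ===== SOURCE B (Python) =====
-- def es_numero_real(cadena):
--     if len(cadena) == 0:
--         return False
--     cuerpo = cadena[1:] if cadena[0] == "-" else cadena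
--     if "-" in cuerpo or cuerpo.count(".") > 1:
--         return False
--     return all(c in "0123456789." for c in cuerpo)
-- ===== Notes on version B (the rewrite author's own statement) =====
-- stated objective: simpler
-- what changed: Replaces the index-and-flag character loop with aggregate scans: strip an optional leading minus sign, reject if the remaining body contains a minus or more than one dot, then accept iff every body character is an ASCII digit or a dot.
import Mathlib
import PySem

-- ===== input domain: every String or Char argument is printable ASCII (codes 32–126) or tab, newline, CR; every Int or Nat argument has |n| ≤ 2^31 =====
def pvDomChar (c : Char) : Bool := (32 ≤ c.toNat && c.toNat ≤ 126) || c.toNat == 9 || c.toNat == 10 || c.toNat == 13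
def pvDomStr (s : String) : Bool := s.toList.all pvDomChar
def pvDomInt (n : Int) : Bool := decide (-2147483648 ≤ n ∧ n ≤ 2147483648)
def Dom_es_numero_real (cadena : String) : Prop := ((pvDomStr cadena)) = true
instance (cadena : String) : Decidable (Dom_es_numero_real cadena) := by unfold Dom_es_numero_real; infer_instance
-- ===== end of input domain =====

-- B replaces A's index-and-flag loop with aggregate scans (strip leading '-', then 'in'/count/all); objective: simpler.

-- ===== PORT A =====
-- the for-loop over range(len(cadena)) with index i and flag tiene_punto
def esLoopA : List Char → Nat → Bool → Bool
  | [], _, _ => true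
  | c :: rest, i, tiene =>
    if c = '-' then
      if i ≠ 0 then false else esLoopA rest (i + 1) tiene
    else if c = '.' then
      if tiene then false else esLoopA rest (i + 1) true
    else if c.toNat < 48 ∨ 57 < c.toNat then false
    else esLoopA rest (i + 1) tiene

def es_numero_real (cadena : String) : Bool :=
  if cadena.toList.length = 0 then false
  else esLoopA cadena.toList 0 false

-- ===== PORT B =====
def es_numero_real_alt (cadena : String) : Bool :=
  match cadena.toList with
  | [] => false
  | c0 :: rest =>
    let cuerpo := if c0 = '-' then rest else c0 :: rest
    if cuerpo.contains '-' || cuerpo.count '.' > 1 then false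
    else cuerpo.all (fun c => ("0123456789.".toList).contains c)

-- ===== PRECONDITION & SPEC =====
def Spec_es_numero_real (cadena : String) (out : Bool) : Prop := out = es_numero_real_alt cadena
instance (cadena : String) (out : Bool) : Decidable (Spec_es_numero_real cadena out) := by unfold Spec_es_numero_real; infer_instance

-- ===== CLAIM (what is proved, stated in full; the proofs are below) =====
def Claim_equal_es_numero_real : Prop := ∀ (cadena : String), Dom_es_numero_real cadena → Spec_es_numero_real cadena (es_numero_real cadena)

-- ===== LEMMAS AND PROOFS =====

theorem char_eq_iff (c d : Char) : c = d ↔ c.toNat = d.toNat := by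
  constructor
  · intro h; rw [h]
  · intro h; exact Char.ext (by exact UInt32.toNat_inj.mp h)

-- membership in "0123456789." equals "is '.' or an ASCII digit"
theorem mem_digits_dot (c : Char) :
    (("0123456789.".toList).contains c) = (c = '.' || (48 ≤ c.toNat && c.toNat ≤ 57)) := by
  rw [Bool.eq_iff_iff]
  simp only [show ("0123456789.".toList) = ['0','1','2','3','4','5','6','7','8','9','.'] from rfl]
  simp [char_eq_iff]
  omega

-- after position 0 the loop is a pure aggregate condition
theorem esLoopA_char (l : List Char) (i : Nat) (tiene : Bool) :
    esLoopA l (i + 1) tiene =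
      (!l.contains '-' && decide (l.count '.' ≤ (if tiene then 0 else 1)) &&
        l.all (fun c => c = '.' || (48 ≤ c.toNat && c.toNat ≤ 57))) := by
  induction l generalizing i tiene with
  | nil => simp [esLoopA]
  | cons c rest ih =>
    by_cases hm : c = '-'
    · subst hm; simp [esLoopA]
    · by_cases hd : c = '.'
      · subst hd
        cases tiene with
        | true => simp [esLoopA, List.count_cons]
        | false =>
          simp only [esLoopA, if_neg (by decide : ¬ ('.' : Char) = '-'),
            Bool.false_eq_true, if_false, if_pos rfl, ih]
          simp [List.count_cons, Ne.symm hm]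
      · by_cases hr : c.toNat < 48 ∨ 57 < c.toNat
        · have hgc : (decide (c = '.') || (decide (48 ≤ c.toNat) && decide (c.toNat ≤ 57))) = false := by
            simp only [Bool.or_eq_false_iff, Bool.and_eq_false_iff, decide_eq_false_iff_not]
            exact ⟨hd, by omega⟩
          simp only [esLoopA, if_neg hm, if_neg hd, if_pos hr, List.all_cons, hgc,
            Bool.false_and, Bool.and_false]
        · rw [not_or] at hr
          have h48 : decide (48 ≤ c.toNat) = true := by simp only [decide_eq_true_eq]; omega
          have h57 : decide (c.toNat ≤ 57) = true := by simp only [decide_eq_true_eq]; omega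
          simp only [esLoopA, if_neg hm, if_neg hd,
            if_neg (by omega : ¬ (c.toNat < 48 ∨ 57 < c.toNat)), ih]
          simp [List.count_cons, List.contains_cons, hd, Ne.symm hm, h48, h57]

-- at index 0 with a non-'-' head the loop already behaves like the positive-index loop
theorem esLoopA_zero (c0 : Char) (rest : List Char) (t : Bool) (hm : ¬ c0 = '-') :
    esLoopA (c0 :: rest) 0 t =
      (!(c0 :: rest).contains '-' &&
        decide ((c0 :: rest).count '.' ≤ (if t then 0 else 1)) &&
        (c0 :: rest).all (fun c => c = '.' || (48 ≤ c.toNat && c.toNat ≤ 57))) := by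
  rw [← esLoopA_char (c0 :: rest) 0 t]
  by_cases hd : c0 = '.'
  · subst hd
    cases t with
    | true => simp [esLoopA]
    | false =>
      simp only [esLoopA, if_neg (by decide : ¬ ('.' : Char) = '-'),
        Bool.false_eq_true, if_false, if_pos rfl]
      rw [esLoopA_char rest 0 true, esLoopA_char rest (0 + 1) true]
      simp
  · by_cases hr : c0.toNat < 48 ∨ 57 < c0.toNat
    · simp [esLoopA, hm, hd, hr]
    · simp only [esLoopA, if_neg hm, if_neg hd, if_neg hr]
      rw [esLoopA_char rest 0 t, esLoopA_char rest (0 + 1) t]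

-- the aggregate condition equals B's guard-then-all shape
theorem agg_eq (l : List Char) :
    (!l.contains '-' && decide (l.count '.' ≤ 1) &&
        l.all (fun c => c = '.' || (48 ≤ c.toNat && c.toNat ≤ 57))) =
      (if l.contains '-' || l.count '.' > 1 then false
       else l.all (fun c => ("0123456789.".toList).contains c)) := by
  simp only [mem_digits_dot]
  cases hc : l.contains '-'
  · by_cases hcnt : l.count '.' ≤ 1 <;> simp [hcnt]
  · simp

theorem es_numero_real_spec : Claim_equal_es_numero_real := by
  intro cadena _
  unfold Spec_es_numero_real es_numero_real es_numero_real_alt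
  cases h : cadena.toList with
  | nil => simp
  | cons c0 rest =>
    simp only [List.length_cons]
    rw [if_neg (by omega)]
    by_cases hm : c0 = '-'
    · subst hm
      simp only [esLoopA, if_pos rfl, if_neg (by omega : ¬ (0 : Nat) ≠ 0)]
      rw [esLoopA_char rest 0 false]
      simpa using agg_eq rest
    · rw [esLoopA_zero c0 rest false hm]
      simpa [hm] using agg_eq (c0 :: rest)
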